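-- pv_equiv track=rewrite | github.com/VivaH/sui-turf-map | generate_report.py | inject_after_nth
-- ===== SOURCE A (Python) =====
-- def inject_after_nth(html, tag, n, insertion):
--     pos, count = 0, 0
--     while True:
--         idx = html.find(tag, pos)
--         if idx == -1:
--             break
--         count += 1
--         if count == n:
--             insert_at = idx + len(tag)
--             return html[:insert_at] + '\n' + insertion + '\n' + html[insert_at:]
--         pos = idx + 1
--     # Fallback: append
--     return html + '\n' + insertion
-- ===== SOURCE B (Python) =====
-- def inject_after_nth(html, tag, n, insertion):
--     positions = [i for i in range(len(html)) if html.startswith(tag, i)]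
--     if 1 <= n <= len(positions):
--         at = positions[n - 1] + len(tag)
--         return html[:at] + '\n' + insertion + '\n' + html[at:]
--     return html + '\n' + insertion
-- ===== Notes on version B (the rewrite author's own statement) =====
-- stated objective: alternative
-- what changed: Replaces A's stateful early-exit find()-loop by a full comprehension collecting every (overlapping) occurrence index via startswith, followed by a constant-time bounds check and selection of positions[n-1].
-- intended difference: When tag is the empty string and n == len(html)+1, A counts find('')'s phantom match one past the end and returns html+'\n'+insertion+'\n', while B finds only the len(html) real positions and appends html+'\n'+insertion, the intended fallback for a degenerate pattern with no n-th occurrence. — e.g. on inject_after_nth("", "", 1, "x"): A returns "\nx\n", B returns "\nx"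
import Mathlib
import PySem

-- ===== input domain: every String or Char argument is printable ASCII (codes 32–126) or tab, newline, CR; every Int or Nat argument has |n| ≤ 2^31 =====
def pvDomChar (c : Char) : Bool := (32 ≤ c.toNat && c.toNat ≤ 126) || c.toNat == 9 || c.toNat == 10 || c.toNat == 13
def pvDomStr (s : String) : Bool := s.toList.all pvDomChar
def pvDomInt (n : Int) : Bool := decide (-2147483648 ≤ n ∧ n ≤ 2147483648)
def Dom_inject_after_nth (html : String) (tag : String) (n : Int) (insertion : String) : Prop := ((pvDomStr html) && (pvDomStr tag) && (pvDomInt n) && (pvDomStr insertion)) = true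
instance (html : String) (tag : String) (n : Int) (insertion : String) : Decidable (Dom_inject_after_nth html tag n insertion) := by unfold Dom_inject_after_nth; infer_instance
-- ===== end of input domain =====

-- B replaces A's early-exit find loop by a full comprehension of all (overlapping)
-- occurrence indices followed by a constant-time selection; objective: alternative.

-- ===== PORT A =====
-- A's while-loop: pos strictly increases each iteration and find(tag, pos) = -1 once
-- pos > len(html), so |html|+2 steps of fuel always suffice; the fuel-0 branch is unreachable.
def injLoopA (h t ins : List Char) (n : Int) : Nat → Int → Int → List Char
  | 0, _, _ => h ++ ['\n'] ++ ins
  | fuel+1, pos, count =>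
    let idx := PySem.Chars.findFrom h t pos
    if idx = -1 then h ++ ['\n'] ++ ins
    else if count + 1 = n then
      PySem.Chars.slice h none (some (idx + (t.length : Int))) ++ ['\n'] ++ ins
        ++ ['\n'] ++ PySem.Chars.slice h (some (idx + (t.length : Int))) none
    else injLoopA h t ins n fuel (idx + 1) (count + 1)

def inject_after_nth (html : String) (tag : String) (n : Int) (insertion : String) : String :=
  String.ofList (injLoopA html.toList tag.toList insertion.toList n (html.toList.length + 2) 0 0)

-- ===== PORT B =====
-- html.startswith(tag, i) with 0 ≤ i < len(html) is exactly: tag is a prefix of html[i:].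
def inject_after_nth_alt (html : String) (tag : String) (n : Int) (insertion : String) : String :=
  let h := html.toList
  let t := tag.toList
  let ins := insertion.toList
  let positions := (PySem.List.pyRange 0 (h.length : Int) 1).filter
      (fun i => PySem.Chars.startswith (h.drop i.toNat) t)
  String.ofList (
    if 1 ≤ n ∧ n ≤ (positions.length : Int) then
      let insertAt := PySem.List.pyGetD positions (n - 1) 0 + (t.length : Int)
      PySem.Chars.slice h none (some insertAt) ++ ['\n'] ++ ins
        ++ ['\n'] ++ PySem.Chars.slice h (some insertAt) none
    else h ++ ['\n'] ++ ins)

-- ===== PRECONDITION & SPEC =====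
-- When tag = "" and n = len(html)+1, A counts str.find('')'s phantom match one past the
-- end and returns html+'\n'+insertion+'\n', while B finds only the len(html) real
-- positions and returns the fallback html+'\n'+insertion, the intended behaviour for a
-- degenerate pattern with no n-th occurrence.
def D_inject_after_nth (html : String) (tag : String) (n : Int) (insertion : String) : Prop :=
  tag = "" ∧ n = (html.toList.length : Int) + 1
instance (html : String) (tag : String) (n : Int) (insertion : String) : Decidable (D_inject_after_nth html tag n insertion) := by unfold D_inject_after_nth; infer_instance

def Spec_inject_after_nth (html : String) (tag : String) (n : Int) (insertion : String) (out : String) : Prop := ¬ D_inject_after_nth html tag n insertion → out = inject_after_nth_alt html tag n insertion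
instance (html : String) (tag : String) (n : Int) (insertion : String) (out : String) : Decidable (Spec_inject_after_nth html tag n insertion out) := by unfold Spec_inject_after_nth; infer_instance

def pvDiffWitness_inject_after_nth : String × String × Int × String := ("", "", 1, "x")
def pvDiffWitnessOut_inject_after_nth : String × String := ("\nx\n", "\nx")

-- ===== CLAIM (what is proved, stated in full; the proofs are below) =====
def Claim_unchanged_inject_after_nth : Prop := ∀ (html : String) (tag : String) (n : Int) (insertion : String), Dom_inject_after_nth html tag n insertion → Spec_inject_after_nth html tag n insertion (inject_after_nth html tag n insertion)
def Claim_changed_inject_after_nth : Prop := Dom_inject_after_nth (pvDiffWitness_inject_after_nth.1) (pvDiffWitness_inject_after_nth.2.1) (pvDiffWitness_inject_after_nth.2.2.1) (pvDiffWitness_inject_after_nth.2.2.2) ∧ D_inject_after_nth (pvDiffWitness_inject_after_nth.1) (pvDiffWitness_inject_after_nth.2.1) (pvDiffWitness_inject_after_nth.2.2.1) (pvDiffWitness_inject_after_nth.2.2.2) ∧ inject_after_nth (pvDiffWitness_inject_after_nth.1) (pvDiffWitness_inject_after_nth.2.1) (pvDiffWitness_inject_after_nth.2.2.1) (pvDiffWitness_inject_after_nth.2.2.2)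 = pvDiffWitnessOut_inject_after_nth.1 ∧ inject_after_nth_alt (pvDiffWitness_inject_after_nth.1) (pvDiffWitness_inject_after_nth.2.1) (pvDiffWitness_inject_after_nth.2.2.1) (pvDiffWitness_inject_after_nth.2.2.2) = pvDiffWitnessOut_inject_after_nth.2 ∧ pvDiffWitnessOut_inject_after_nth.1 ≠ pvDiffWitnessOut_inject_after_nth.2
def Claim_exact_inject_after_nth : Prop := ∀ (html : String) (tag : String) (n : Int) (insertion : String), Dom_inject_after_nth html tag n insertion → D_inject_after_nth html tag n insertion → inject_after_nth html tag n insertion ≠ inject_after_nth_alt html tag n insertion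

-- ===== LEMMAS AND PROOFS =====

theorem findFrom_past (s sub : List Char) (st : Int) (hst : (s.length : Int) < st) :
    PySem.Chars.findFrom s sub st = -1 := by
  have h0 : ¬ st < 0 := by omega
  simp only [PySem.Chars.findFrom, h0, if_false]
  rw [if_pos hst]

theorem pyGetD_cons_of_pos {x : Int} {xs : List Int} {i : Int} {d : Int} (hi : 1 ≤ i) :
    PySem.List.pyGetD (x :: xs) i d = PySem.List.pyGetD xs (i - 1) d := by
  have h1 : i = ((i.toNat : Nat) : Int) := by omega
  have h2 : i - 1 = ((i.toNat - 1 : Nat) : Int) := by omega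
  rw [h2, h1, PySem.List.pyGetD_natCast, PySem.List.pyGetD_natCast]
  obtain ⟨m, hm⟩ : ∃ m, i.toNat = m + 1 := ⟨i.toNat - 1, by omega⟩
  simp [hm]

-- A's loop equals the "collect all occurrence indices up to len(html)+1, then select" form.
theorem loop_eq (h t ins : List Char) (n : Int) :
    ∀ (fuel : Nat) (pos count : Int), 0 ≤ pos → pos ≤ (h.length : Int) + 1 →
    h.length + 2 ≤ fuel + pos.toNat →
    injLoopA h t ins n fuel pos count =
      (let ps := (PySem.List.pyRange pos ((h.length : Int) + 1) 1).filter
          (fun i => PySem.Chars.startswith (h.drop i.toNat) t)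
       if 1 ≤ n - count ∧ n - count ≤ (ps.length : Int) then
         PySem.Chars.slice h none (some (PySem.List.pyGetD ps (n - count - 1) 0 + (t.length : Int))) ++ ['\n'] ++ ins
           ++ ['\n'] ++ PySem.Chars.slice h (some (PySem.List.pyGetD ps (n - count - 1) 0 + (t.length : Int))) none
       else h ++ ['\n'] ++ ins) := by
  intro fuel
  induction fuel with
  | zero =>
    intro pos count h0 h1 hf
    exfalso; omega
  | succ fuel IH =>
    intro pos count h0 h1 hf
    obtain ⟨k, rfl⟩ : ∃ m : Nat, pos = (m : Int) := ⟨pos.toNat, by omega⟩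
    simp only [injLoopA]
    by_cases hp : (k : Int) ≤ (h.length : Int)
    case neg =>
      have hgt : ((h.length : Int) + 1) ≤ (k : Int) := by omega
      rw [if_pos (findFrom_past h t ((k : Int)) (by omega))]
      rw [PySem.List.pyRange_one_eq_nil hgt]
      simp only [List.filter_nil, List.length_nil]
      rw [if_neg (by push_cast; omega)]
    case pos =>
      have hkle : k ≤ h.length := by exact_mod_cast hp
      set idx := PySem.Chars.findFrom h t (k : Int) with hidxdef
      by_cases hidx : idx = -1
      case pos =>
        rw [if_pos hidx]
        have hnot : ¬ t <:+: h.drop k :=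
          (PySem.Chars.findFrom_natCast_eq_neg_one_iff h t k hkle).mp hidx
        have hfilter : (PySem.List.pyRange (k : Int) ((h.length : Int) + 1) 1).filter
            (fun i => PySem.Chars.startswith (h.drop i.toNat) t) = [] := by
          rw [List.filter_eq_nil_iff]
          intro i hi
          rw [PySem.List.mem_pyRange_one] at hi
          intro hsw
          have hpre : t <+: h.drop i.toNat := (PySem.Chars.startswith_iff _ _).mp hsw
          apply hnot
          have hdd : h.drop i.toNat = (h.drop k).drop (i.toNat - k) := by
            rw [List.drop_drop]; congr 1; omega
          rw [hdd] at hpre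
          exact hpre.isInfix.trans (List.drop_suffix _ _).isInfix
        rw [hfilter]
        simp only [List.length_nil]
        rw [if_neg (by push_cast; omega)]
      case neg =>
        obtain ⟨hle, hpre, hmin⟩ := PySem.Chars.findFrom_natCast_spec h t k hkle hidx
        rw [← hidxdef] at hle hpre hmin
        have hidxle : idx ≤ (h.length : Int) := by
          have heq := PySem.Chars.findFrom_natCast h t k hkle
          rw [← hidxdef] at heq
          have hfl := PySem.Chars.find_le_length (h.drop k) t
          rw [List.length_drop] at hfl
          by_cases hr : PySem.Chars.find (h.drop k) t = -1
          · rw [heq, if_pos hr] at hidx; exact absurd rfl hidx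
          · rw [heq, if_neg hr]; omega
        have h0idx : 0 ≤ idx := by omega
        have hsplit : PySem.List.pyRange (k : Int) ((h.length : Int) + 1) 1
            = PySem.List.pyRange (k : Int) idx 1 ++ (idx :: PySem.List.pyRange (idx + 1) ((h.length : Int) + 1) 1) := by
          rw [PySem.List.pyRange_one_append (k : Int) idx ((h.length : Int) + 1) hle (by omega)]
          rw [PySem.List.pyRange_one_cons (by omega : idx < (h.length : Int) + 1)]
        have hfilter1 : (PySem.List.pyRange (k : Int) idx 1).filter
            (fun i => PySem.Chars.startswith (h.drop i.toNat) t) = [] := by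
          rw [List.filter_eq_nil_iff]
          intro i hi
          rw [PySem.List.mem_pyRange_one] at hi
          intro hsw
          exact hmin i.toNat (by omega) (by omega) ((PySem.Chars.startswith_iff _ _).mp hsw)
        have hfidx : PySem.Chars.startswith (h.drop idx.toNat) t = true :=
          (PySem.Chars.startswith_iff _ _).mpr hpre
        have hps : (PySem.List.pyRange (k : Int) ((h.length : Int) + 1) 1).filter
            (fun i => PySem.Chars.startswith (h.drop i.toNat) t)
            = idx :: (PySem.List.pyRange (idx + 1) ((h.length : Int) + 1) 1).filter
                (fun i => PySem.Chars.startswith (h.drop i.toNat) t) := by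
          rw [hsplit, List.filter_append, hfilter1, List.nil_append]
          simp only [List.filter_cons, hfidx, if_true]
        rw [if_neg hidx]
        set rest := (PySem.List.pyRange (idx + 1) ((h.length : Int) + 1) 1).filter
            (fun i => PySem.Chars.startswith (h.drop i.toNat) t) with hrest
        by_cases hc : count + 1 = n
        case pos =>
          rw [if_pos hc]
          simp only [hps]
          rw [if_pos ⟨by omega, by simp only [List.length_cons]; push_cast; omega⟩]
          have hget : PySem.List.pyGetD (idx :: rest) (n - count - 1) 0 = idx := by
            have : n - count - 1 = ((0 : Nat) : Int) := by omega
            rw [this, PySem.List.pyGetD_natCast]; rfl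
          rw [hget]
        case neg =>
          rw [if_neg hc]
          rw [IH (idx + 1) (count + 1) (by omega) (by omega) (by omega)]
          simp only [hps]
          by_cases hC : 1 ≤ n - (count + 1) ∧ n - (count + 1) ≤ ((rest.length : Nat) : Int)
          · rw [if_pos hC]
            rw [if_pos (by constructor <;> [omega; (simp only [List.length_cons]; push_cast; omega)])]
            have hget : PySem.List.pyGetD (idx :: rest) (n - count - 1) 0
                = PySem.List.pyGetD rest (n - count - 1 - 1) 0 :=
              pyGetD_cons_of_pos (by omega)
            rw [hget]
            have : n - count - 1 - 1 = n - (count + 1) - 1 := by ring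
            rw [this]
          · rw [if_neg hC]
            rw [if_neg (by simp only [List.length_cons]; push_cast at hC ⊢; omega)]

theorem startswith_nil_right (s : List Char) : PySem.Chars.startswith s [] = true :=
  (PySem.Chars.startswith_iff _ _).mpr List.nil_prefix

theorem startswith_nil_left (t : List Char) (h : t ≠ []) :
    PySem.Chars.startswith [] t = false := by
  cases h' : PySem.Chars.startswith [] t
  · rfl
  · exact absurd (List.prefix_nil.mp ((PySem.Chars.startswith_iff _ _).mp h')) h

-- the occurrence lists of A's characterisation and of B differ only in the
-- phantom index len(html), which survives the filter exactly for the empty tag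
theorem filter_split (h t : List Char) :
    (PySem.List.pyRange 0 ((h.length : Int) + 1) 1).filter
        (fun i => PySem.Chars.startswith (h.drop i.toNat) t)
      = (PySem.List.pyRange 0 (h.length : Int) 1).filter
          (fun i => PySem.Chars.startswith (h.drop i.toNat) t)
        ++ (if PySem.Chars.startswith ([] : List Char) t then [(h.length : Int)] else []) := by
  rw [PySem.List.pyRange_one_succ_right (by positivity), List.filter_append]
  congr 1
  simp only [List.filter_cons, List.filter_nil, Int.toNat_natCast, List.drop_length]

theorem pyGetD_append_left (xs ys : List Int) (i : Int) (d : Int)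
    (h0 : 0 ≤ i) (h1 : i < (xs.length : Int)) :
    PySem.List.pyGetD (xs ++ ys) i d = PySem.List.pyGetD xs i d := by
  rw [PySem.List.pyGetD_eq_getElem _ _ h0 (by simp; omega),
      PySem.List.pyGetD_eq_getElem _ _ h0 h1]
  exact List.getElem_append_left (by omega)

theorem tolist_ne (xs ys : List Char) (h : xs.length ≠ ys.length) :
    String.ofList xs ≠ String.ofList ys := by
  intro he
  apply h
  have h2 := congrArg String.toList he
  rw [String.toList_ofList, String.toList_ofList] at h2
  rw [h2]

-- ===== VERDICT (by name: the statement is the Claim_ definition above) =====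
theorem inject_after_nth_spec : Claim_unchanged_inject_after_nth := by
  intro html tag n insertion _ hnD
  unfold inject_after_nth inject_after_nth_alt
  rw [loop_eq html.toList tag.toList insertion.toList n _ 0 0 (by omega) (by omega) (by omega)]
  simp only [sub_zero, filter_split]
  by_cases htag : tag = ""
  · subst htag
    have hnil : ("" : String).toList = [] := rfl
    rw [hnil]
    simp only [startswith_nil_right, if_true, List.filter_true, List.length_append,
      List.length_cons, List.length_nil, PySem.List.length_pyRange_one, sub_zero,
      Int.toNat_natCast]
    have hne : n ≠ (html.toList.length : Int) + 1 := fun he => hnD ⟨rfl, he⟩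
    by_cases hn1 : 1 ≤ n ∧ n ≤ (html.toList.length : Int)
    · rw [if_pos ⟨hn1.1, by omega⟩, if_pos ⟨hn1.1, by omega⟩]
      rw [pyGetD_append_left _ _ _ _ (by omega)
            (by rw [PySem.List.length_pyRange_one]; omega)]
    · rw [if_neg (by push_cast; omega), if_neg (by push_cast; omega)]
  · have ht : tag.toList ≠ [] := fun he => htag (String.toList_eq_nil_iff.mp he)
    have hz : (if PySem.Chars.startswith ([] : List Char) tag.toList
        then [(html.toList.length : Int)] else []) = ([] : List Int) := by
      rw [startswith_nil_left _ ht]; rfl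
    rw [hz, List.append_nil]

theorem inject_after_nth_changed : Claim_changed_inject_after_nth := by
  unfold Claim_changed_inject_after_nth; decide

theorem inject_after_nth_tight : Claim_exact_inject_after_nth := by
  intro html tag n insertion _ hD
  obtain ⟨htag, hn⟩ := hD
  subst htag hn
  unfold inject_after_nth inject_after_nth_alt
  rw [loop_eq html.toList ("" : String).toList insertion.toList _ _ 0 0 (by omega) (by omega) (by omega)]
  simp only [sub_zero, filter_split]
  have hnil : ("" : String).toList = [] := rfl
  rw [hnil]
  simp only [startswith_nil_right, if_true, List.filter_true, List.length_append,
    List.length_cons, List.length_nil, PySem.List.length_pyRange_one, sub_zero,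
    Int.toNat_natCast]
  rw [if_pos ⟨by omega, by omega⟩,
      if_neg (by omega)]
  have hgA : PySem.List.pyGetD
      (PySem.List.pyRange 0 (html.toList.length : Int) 1 ++ [(html.toList.length : Int)])
      ((html.toList.length : Int) + 1 - 1) 0 = (html.toList.length : Int) := by
    have h1 : (html.toList.length : Int) + 1 - 1
        = ((html.toList.length : Nat) : Int) := by omega
    rw [h1, PySem.List.pyGetD_natCast]
    simp [PySem.List.length_pyRange_one]
  rw [hgA]
  simp only [Nat.cast_zero, add_zero]
  have hs : ∀ (xs : List Char) (a b : Option Int),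
      PySem.Chars.slice xs a b = PySem.List.slice xs a b := fun _ _ _ => rfl
  rw [hs, hs, PySem.List.slice_to_natCast, PySem.List.slice_from_natCast, List.take_length,
    List.drop_length]
  apply tolist_ne
  simp only [List.length_append, List.length_cons, List.length_nil]
  omega
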